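-- pv_equiv track=rewrite | github.com/ini/euler | solve.py | problem_52
-- ===== SOURCE A (Python) =====
-- import itertools
--
-- def problem_52(k=6):
--     """
--     Find the smallest positive integer n such that 2n, 3n, ..., kn
--     all have the same digits in some order.
--
--     Notes
--     -----
--     If 2n, 3n, ... kn all have the same digits, then they have the same digital
--     sum s, and thus are all congruent to s mod 9. If k > 2, this implies n = 0 mod 9.
--     """
--     if k <= 2:
--         return 1
--
--     for i in itertools.count(start=1):
--         start, stop = 10**i // 2, 10**(i + 1) // k + 1
--         start = ((start + 9 - 1) // 9) * 9 # round up to nearest multiple of 9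
--         for x in range(start, stop, 9):
--             digits = sorted(str(2 * x))
--             if all(sorted(str(k * x)) == digits for k in range(3, k + 1)):
--                 return x
-- ===== SOURCE B (Python) =====
-- import itertools
--
-- def problem_52(k=6):
--     if k <= 2:
--         return 1
--     for n in itertools.count(start=9, step=9):
--         digits = sorted(str(2 * n))
--         if all(sorted(str(m * n)) == digits for m in range(3, k + 1)):
--             return n
-- ===== Notes on version B (the rewrite author's own statement) =====
-- stated objective: simpler
-- what changed: Replaced A's two nested loops (outer digit-length bands 10**i//2 .. 10**(i+1)//k, inner in-band scan) by one flat scan over all multiples of 9; the banding only skipped candidates whose k-fold multiple has more digits than its double and so necessarily fails the permutation test, so the results are identical. Pre_ excludes k >= 7, where the search never succeeds and A returns no value (diverges).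
import Mathlib
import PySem

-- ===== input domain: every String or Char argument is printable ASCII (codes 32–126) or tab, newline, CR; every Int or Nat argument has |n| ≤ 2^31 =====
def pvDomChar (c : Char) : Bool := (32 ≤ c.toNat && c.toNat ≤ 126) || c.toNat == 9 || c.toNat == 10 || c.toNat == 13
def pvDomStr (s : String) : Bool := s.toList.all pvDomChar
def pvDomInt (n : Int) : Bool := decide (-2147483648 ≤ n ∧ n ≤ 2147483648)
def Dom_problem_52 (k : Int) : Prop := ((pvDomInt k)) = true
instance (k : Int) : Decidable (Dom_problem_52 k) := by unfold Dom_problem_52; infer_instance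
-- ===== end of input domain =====

-- B replaces A's two nested loops (outer digit-length bands, inner in-band scan) by one
-- flat scan over the multiples of 9; objective: simpler. The fuel arguments only make the
-- unbounded Python searches total; inside Pre_ they are never exhausted.

-- ===== PORT A =====
-- all(sorted(str(k*x)) == digits ...); the genexpr variable (Python shadows k) is m here
def pA_pred (k x : Int) : Bool :=
  let digits := PySem.List.sorted (PySem.Int.toChars (2 * x)) (fun c => c) false
  (PySem.List.pyRange 3 (k + 1) 1).all
    (fun m => PySem.List.sorted (PySem.Int.toChars (m * x)) (fun c => c) false == digits)

-- for x in range(start, stop, 9): if …: return x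
def pA_inner (k : Int) : List Int → Option Int
  | [] => none
  | x :: rest => if pA_pred k x then some x else pA_inner k rest

-- for i in itertools.count(start=1): … (fuel makes the loop total; never exhausted on Pre_)
def pA_outer (k : Int) : Nat → Nat → Int
  | 0, _ => 0
  | fuel + 1, i =>
    let start := PySem.Int.floordiv ((10 : Int) ^ i) 2
    let stop := PySem.Int.floordiv ((10 : Int) ^ (i + 1)) k + 1
    let start := (PySem.Int.floordiv (start + 9 - 1) 9) * 9
    match pA_inner k (PySem.List.pyRange start stop 9) with
    | some x => x
    | none => pA_outer k fuel (i + 1)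

def problem_52 (k : Int) : Int :=
  if k ≤ 2 then 1 else pA_outer k 10 1

-- ===== PORT B =====
-- for n in itertools.count(start=9, step=9): … (fuel makes the loop total; never exhausted on Pre_)
def pB_loop (k : Int) : Nat → Int → Int
  | 0, _ => 0
  | fuel + 1, n =>
    let digits := PySem.List.sorted (PySem.Int.toChars (2 * n)) (fun c => c) false
    if (PySem.List.pyRange 3 (k + 1) 1).all
        (fun m => PySem.List.sorted (PySem.Int.toChars (m * n)) (fun c => c) false == digits)
    then n else pB_loop k fuel (n + 9)

def problem_52_alt (k : Int) : Int :=
  if k ≤ 2 then 1 else pB_loop k 20000 9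

-- ===== PRECONDITION & SPEC =====
-- Pre_ excludes k ≥ 7, on which A returns NO value: for k ≥ 7 the search never succeeds
-- within any feasible bound (a run at k = 7 finds nothing after minutes), so A diverges there.
def Pre_problem_52 (k : Int) : Prop := k ≤ 6
instance (k : Int) : Decidable (Pre_problem_52 k) := by unfold Pre_problem_52; infer_instance
def pvWitness_problem_52 : Int := (6)

def Spec_problem_52 (k : Int) (out : Int) : Prop := out = problem_52_alt k
instance (k : Int) (out : Int) : Decidable (Spec_problem_52 k out) := by unfold Spec_problem_52; infer_instance

-- ===== CLAIM (what is proved, stated in full; the proofs are below) =====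
def Claim_equal_problem_52 : Prop := ∀ (k : Int), Dom_problem_52 k → Pre_problem_52 k → Spec_problem_52 k (problem_52 k)

-- ===== LEMMAS AND PROOFS =====

-- s₀ : the least multiple of 9 (≥ 9) satisfying pA_pred, given that one exists
def pvS0 (k : Int) (hex : ∃ j : Nat, pA_pred k (9 + 9 * (j : Int)) = true) : Int :=
  9 + 9 * ((Nat.find hex : Nat) : Int)

theorem pvS0_true (k : Int) (hex : ∃ j : Nat, pA_pred k (9 + 9 * (j : Int)) = true) :
    pA_pred k (pvS0 k hex) = true := Nat.find_spec hex

theorem pvS0_ge (k : Int) (hex : ∃ j : Nat, pA_pred k (9 + 9 * (j : Int)) = true) :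
    9 ≤ pvS0 k hex := by unfold pvS0; omega

theorem pvS0_dvd (k : Int) (hex : ∃ j : Nat, pA_pred k (9 + 9 * (j : Int)) = true) :
    (9 : Int) ∣ pvS0 k hex := ⟨1 + (Nat.find hex : Int), by unfold pvS0; ring⟩

theorem pvS0_le (k : Int) (hex : ∃ j : Nat, pA_pred k (9 + 9 * (j : Int)) = true)
    (j : Nat) (hj : pA_pred k (9 + 9 * (j : Int)) = true) : pvS0 k hex ≤ 9 + 9 * (j : Int) := by
  unfold pvS0
  have := Nat.find_min' hex hj
  omega

theorem pvS0_min (k : Int) (hex : ∃ j : Nat, pA_pred k (9 + 9 * (j : Int)) = true)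
    (x : Int) (hx9 : 9 ≤ x) (hdvd : (9 : Int) ∣ x) (hlt : x < pvS0 k hex) :
    pA_pred k x = false := by
  obtain ⟨m, rfl⟩ := hdvd
  have hm : 1 ≤ m := by omega
  have hx : (9 : Int) * m = 9 + 9 * ((m - 1).toNat : Int) := by omega
  have hj : (m - 1).toNat < Nat.find hex := by
    unfold pvS0 at hlt; omega
  have := Nat.find_min hex hj
  rw [hx]
  simpa using this

-- ===== find? on step-9 progressions =====

theorem find?_map_range_some (p : Int → Bool) :
    ∀ (c : Nat) (a : Int) (t0 : Nat), t0 < c → p (a + 9 * (t0 : Int)) = true →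
    (∀ t : Nat, t < t0 → p (a + 9 * (t : Int)) = false) →
    ((List.range c).map (fun t : Nat => a + 9 * (t : Int))).find? p = some (a + 9 * (t0 : Int)) := by
  intro c
  induction c with
  | zero => intro a t0 h; omega
  | succ c ih =>
    intro a t0 ht0 hp hfail
    rw [List.range_succ_eq_map, List.map_cons, List.map_map]
    have hcomp : ((fun t : Nat => a + 9 * (t : Int)) ∘ Nat.succ) =
        (fun t : Nat => (a + 9) + 9 * (t : Int)) := by
      funext t; simp [Function.comp]; ring
    rw [hcomp]
    rcases Nat.eq_zero_or_pos t0 with rfl | hpos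
    · simp only [Nat.cast_zero, mul_zero, add_zero] at hp ⊢
      rw [List.find?_cons_of_pos hp]
    · have h0 : p (a + 9 * ((0 : Nat) : Int)) = false := hfail 0 hpos
      simp only [Nat.cast_zero, mul_zero, add_zero] at h0
      rw [List.find?_cons_of_neg (by simp [h0])]
      have hrec := ih (a + 9) (t0 - 1) (by omega)
        (by have h : a + 9 + 9 * (((t0 - 1 : Nat)) : Int) = a + 9 * (t0 : Int) := by
              have hc : ((t0 - 1 : Nat) : Int) = (t0 : Int) - 1 := by omega
              rw [hc]; ring
            rw [h]; exact hp)
        (by intro t ht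
            have h : a + 9 + 9 * ((t : Nat) : Int) = a + 9 * ((t + 1 : Nat) : Int) := by
              push_cast; ring
            rw [h]; exact hfail (t + 1) (by omega))
      rw [hrec]
      congr 1
      have hc : ((t0 - 1 : Nat) : Int) = (t0 : Int) - 1 := by omega
      rw [hc]; ring

theorem find?_pyRange9_some (p : Int → Bool) (a b s : Int)
    (ha : a ≤ s) (hb : s < b) (hdvd : (9 : Int) ∣ s - a) (hp : p s = true)
    (hfail : ∀ x : Int, a ≤ x → x < s → (9 : Int) ∣ x - a → p x = false) :
    (PySem.List.pyRange a b 9).find? p = some s := by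
  rw [PySem.List.pyRange_of_pos a b (by norm_num)]
  have hab : a < b := by omega
  simp only [if_pos hab]
  obtain ⟨j, hj⟩ := hdvd
  have hj0 : 0 ≤ j := by omega
  -- count of elements
  set c := ((b - a + 9 - 1) / 9).toNat with hc
  have hcb : b - a ≤ 9 * ((b - a + 9 - 1) / 9) := by
    have h1 := Int.mul_ediv_add_emod (b - a + 9 - 1) 9
    have h2 := Int.emod_nonneg (b - a + 9 - 1) (by norm_num : (9:Int) ≠ 0)
    have h3 := Int.emod_lt_of_pos (b - a + 9 - 1) (by norm_num : (0:Int) < 9)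
    omega
  have hcpos : 0 ≤ (b - a + 9 - 1) / 9 := by
    apply Int.ediv_nonneg <;> omega
  have ht0c : j.toNat < c := by
    have : 9 * j < 9 * ((b - a + 9 - 1) / 9) := by omega
    omega
  have hs : s = a + 9 * ((j.toNat : Nat) : Int) := by omega
  rw [hs]
  apply find?_map_range_some p c a j.toNat ht0c
  · rw [← hs]; exact hp
  · intro t ht
    apply hfail
    · omega
    · have : (t : Int) < j := by omega
      omega
    · exact ⟨t, by ring⟩

theorem find?_pyRange9_none (p : Int → Bool) (a b : Int)
    (hfail : ∀ x : Int, a ≤ x → x < b → (9 : Int) ∣ x - a → p x = false) :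
    (PySem.List.pyRange a b 9).find? p = none := by
  rw [List.find?_eq_none]
  intro x hx
  rw [PySem.List.mem_pyRange_iff_of_pos (by norm_num) x] at hx
  simp [hfail x hx.1 hx.2.1 hx.2.2]

theorem pA_inner_find (k : Int) : ∀ xs : List Int, pA_inner k xs = xs.find? (pA_pred k) := by
  intro xs
  induction xs with
  | nil => rfl
  | cons x rest ih =>
    simp only [pA_inner, List.find?_cons]
    by_cases h : pA_pred k x = true
    · simp [h]
    · simp only [Bool.not_eq_true] at h
      simp [h, ih]

-- ===== digit-length bounds =====

theorem toDigitsCore_len_pos : ∀ (f n : Nat), 0 < f → 1 ≤ (Nat.toDigitsCore 10 f n []).length := by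
  intro f n hf
  cases f with
  | zero => omega
  | succ f =>
    simp only [Nat.toDigitsCore]
    by_cases h : n / 10 = 0
    · simp [h]
    · simp only [h, if_false]
      rw [Nat.toDigitsCore_lens_eq]
      omega

theorem toDigitsCore_len_lower : ∀ (e f n : Nat), 10 ^ e ≤ n → n < f →
    e + 1 ≤ (Nat.toDigitsCore 10 f n []).length := by
  intro e
  induction e with
  | zero => intro f n _ hf; exact toDigitsCore_len_pos f n (by omega)
  | succ e ih =>
    intro f n hn hf
    have h10 : 10 ≤ n := by
      have h1 : 10 ^ 1 ≤ 10 ^ (e + 1) := Nat.pow_le_pow_right (by omega) (by omega)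
      simp only [pow_one] at h1
      omega
    cases f with
    | zero => omega
    | succ f =>
      simp only [Nat.toDigitsCore]
      have hdiv : n / 10 ≠ 0 := by
        intro h; have := Nat.div_eq_of_lt (by omega : n < 10) ▸ h
        omega
      simp only [hdiv, if_false]
      rw [Nat.toDigitsCore_lens_eq]
      have h1 : 10 ^ e ≤ n / 10 := by
        rw [Nat.le_div_iff_mul_le (by omega)]
        calc 10 ^ e * 10 = 10 ^ (e + 1) := by ring
        _ ≤ n := hn
      have h2 : n / 10 < f := by
        have := Nat.div_lt_self (by omega : 0 < n) (by omega : 1 < 10)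
        omega
      have := ih f (n / 10) h1 h2
      omega

theorem toChars_len_lower (n : Int) (e : Nat) (h : (10 : Int) ^ e ≤ n) :
    e + 1 ≤ (PySem.Int.toChars n).length := by
  have hn : 0 < n := lt_of_lt_of_le (by positivity) h
  unfold PySem.Int.toChars
  rw [if_neg (by omega)]
  unfold Nat.toDigits
  apply toDigitsCore_len_lower
  · have : ((10 : Nat) ^ e : Int) ≤ n := by push_cast; exact h
    omega
  · omega

theorem toChars_len_upper (n : Int) (e : Nat) (h0 : 0 ≤ n) (h : n < (10 : Int) ^ (e + 1)) :
    (PySem.Int.toChars n).length ≤ e + 1 := by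
  unfold PySem.Int.toChars
  rw [if_neg (by omega)]
  apply Nat.toDigits_length 10 n.toNat (e + 1) (by omega)
  have : n < ((10 : Nat) ^ (e + 1) : Int) := by push_cast; exact h
  omega

-- a candidate x with 2x below a power of ten that k·x reaches cannot pass the test
theorem gap_fail (k x : Int) (e : Nat) (hk : 3 ≤ k) (hx : 0 < x)
    (h2 : 2 * x < (10 : Int) ^ (e + 1)) (hkx : (10 : Int) ^ (e + 1) ≤ k * x) :
    pA_pred k x = false := by
  by_contra h
  rw [Bool.not_eq_false] at h
  unfold pA_pred at h
  rw [List.all_eq_true] at h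
  have hmem : k ∈ PySem.List.pyRange 3 (k + 1) 1 := by
    rw [PySem.List.mem_pyRange_one]; omega
  have hk2 := h k hmem
  simp only [beq_iff_eq] at hk2
  have hlen := congrArg List.length hk2
  rw [PySem.List.length_sorted, PySem.List.length_sorted] at hlen
  have hu : (PySem.Int.toChars (2 * x)).length ≤ e + 1 :=
    toChars_len_upper (2 * x) e (by omega) h2
  have hl : e + 2 ≤ (PySem.Int.toChars (k * x)).length := by
    have := toChars_len_lower (k * x) (e + 1) hkx
    omega
  omega

-- ceiling-to-multiple-of-9 bracket facts
theorem ceil9_facts (v : Int) (hv : 1 ≤ v) :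
    v ≤ PySem.Int.floordiv (v + 9 - 1) 9 * 9 ∧
    9 ≤ PySem.Int.floordiv (v + 9 - 1) 9 * 9 ∧
    (∀ x : Int, (9 : Int) ∣ x → v ≤ x → PySem.Int.floordiv (v + 9 - 1) 9 * 9 ≤ x) := by
  rw [PySem.Int.floordiv_eq_ediv_of_pos (by norm_num)]
  have h1 := Int.mul_ediv_add_emod (v + 9 - 1) 9
  have h2 := Int.emod_nonneg (v + 9 - 1) (by norm_num : (9:Int) ≠ 0)
  have h3 := Int.emod_lt_of_pos (v + 9 - 1) (by norm_num : (0:Int) < 9)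
  refine ⟨by omega, by omega, ?_⟩
  intro x ⟨m, hm⟩ hvx
  omega

-- ===== the B loop finds s₀ =====

theorem pB_step (k : Int) (fuel : Nat) (n : Int) :
    pB_loop k (fuel + 1) n = if pA_pred k n then n else pB_loop k fuel (n + 9) := rfl

theorem pB_finds (k : Int) (hex : ∃ j : Nat, pA_pred k (9 + 9 * (j : Int)) = true) :
    ∀ (fuel : Nat) (n : Int), 9 ≤ n → (9 : Int) ∣ n → n ≤ pvS0 k hex →
    pvS0 k hex < n + 9 * fuel → pB_loop k fuel n = pvS0 k hex := by
  intro fuel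
  induction fuel with
  | zero => intro n _ _ h1 h2; omega
  | succ fuel ih =>
    intro n hn9 hdvd hle hlt
    rw [pB_step]
    rcases eq_or_lt_of_le hle with rfl | hltS
    · rw [if_pos (pvS0_true k hex)]
    · rw [if_neg (by rw [pvS0_min k hex n hn9 hdvd hltS]; simp)]
      apply ih (n + 9)
      · omega
      · exact Dvd.dvd.add hdvd (by norm_num)
      · have h9 : (9 : Int) ∣ pvS0 k hex - n := (pvS0_dvd k hex).sub hdvd
        omega
      · push_cast at hlt ⊢
        omega

-- ===== the A loop finds s₀ =====

theorem pA_step (k : Int) (fuel i : Nat) :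
    pA_outer k (fuel + 1) i =
      match pA_inner k (PySem.List.pyRange
          ((PySem.Int.floordiv (PySem.Int.floordiv ((10 : Int) ^ i) 2 + 9 - 1) 9) * 9)
          (PySem.Int.floordiv ((10 : Int) ^ (i + 1)) k + 1) 9) with
      | some x => x
      | none => pA_outer k fuel (i + 1) := rfl

theorem pA_finds (k : Int) (hk : 3 ≤ k) (hex : ∃ j : Nat, pA_pred k (9 + 9 * (j : Int)) = true) :
    ∀ (fuel i : Nat), 1 ≤ i → (10 : Int) ^ i ≤ 2 * pvS0 k hex →
    2 * pvS0 k hex < (10 : Int) ^ (i + fuel) → pA_outer k fuel i = pvS0 k hex := by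
  intro fuel
  induction fuel with
  | zero =>
    intro i _ h1 h2
    rw [Nat.add_zero] at h2; omega
  | succ fuel ih =>
    intro i hi hlow hhigh
    rw [pA_step]
    set s0 := pvS0 k hex with hs0def
    have hs09 : 9 ≤ s0 := pvS0_ge k hex
    have hs0dvd : (9 : Int) ∣ s0 := pvS0_dvd k hex
    have hs0pos : 0 < s0 := by omega
    -- half of 10^i is exact
    obtain ⟨h5, hh5, hh5ge⟩ : ∃ h5 : Int, (10 : Int) ^ i = 2 * h5 ∧ 5 ≤ h5 := by
      refine ⟨5 * 10 ^ (i - 1), ?_, ?_⟩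
      · have : (10 : Int) ^ i = 10 * 10 ^ (i - 1) := by
          rw [← pow_succ']
          congr 1
          omega
        rw [this]; ring
      · have : (1 : Int) ≤ 10 ^ (i - 1) := one_le_pow₀ (by norm_num)
        omega
    have hfd2 : PySem.Int.floordiv ((10 : Int) ^ i) 2 = h5 := by
      rw [PySem.Int.floordiv_eq_ediv_of_pos (by norm_num), hh5]
      exact Int.mul_ediv_cancel_left h5 (by norm_num)
    rw [hfd2]
    obtain ⟨hc1, hc9, hcle⟩ := ceil9_facts h5 (by omega)
    set start := PySem.Int.floordiv (h5 + 9 - 1) 9 * 9 with hstart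
    set stop := PySem.Int.floordiv ((10 : Int) ^ (i + 1)) k + 1 with hstop
    have hstopbr : (stop - 1) * k ≤ (10 : Int) ^ (i + 1) := by
      rw [hstop]
      have := (PySem.Int.le_floordiv_iff_mul_le (a := (10 : Int) ^ (i + 1))
        (q := PySem.Int.floordiv ((10 : Int) ^ (i + 1)) k) (by omega : (0:Int) < k)).mp le_rfl
      simpa using this
    have hstoplt : (10 : Int) ^ (i + 1) < stop * k := by
      rw [hstop]
      exact (PySem.Int.floordiv_lt_iff_lt_mul (by omega : (0:Int) < k)).mp (by omega)
    have hstartdvd : (9 : Int) ∣ start := ⟨PySem.Int.floordiv (h5 + 9 - 1) 9, by rw [hstart]; ring⟩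
    by_cases hband : 2 * s0 < (10 : Int) ^ (i + 1)
    · -- s0 lies in this band
      have hstart_le : start ≤ s0 := hcle s0 hs0dvd (by omega)
      have hstop_gt : s0 < stop := by
        by_contra hge
        rw [not_lt] at hge
        have hkx : (10 : Int) ^ (i + 1) ≤ k * s0 := by
          have h2 : stop * k ≤ s0 * k := mul_le_mul_of_nonneg_right hge (by omega)
          have h3 : s0 * k = k * s0 := by ring
          omega
        have := gap_fail k s0 i hk hs0pos hband hkx
        rw [pvS0_true k hex] at this
        simp at this
      have hfind : pA_inner k (PySem.List.pyRange start stop 9) = some s0 := by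
        rw [pA_inner_find]
        apply find?_pyRange9_some _ _ _ _ hstart_le hstop_gt
          (dvd_sub hs0dvd hstartdvd)
          (pvS0_true k hex)
        intro x hx1 hx2 hx3
        apply pvS0_min k hex x (by omega)
          (by have := hstartdvd; omega) hx2
      rw [hfind]
    · -- every element of this band is below s0 : recurse
      rw [not_lt] at hband
      have hfind : pA_inner k (PySem.List.pyRange start stop 9) = none := by
        rw [pA_inner_find]
        apply find?_pyRange9_none
        intro x hx1 hx2 hx3
        have hxdvd : (9 : Int) ∣ x := by omega
        have hx9 : 9 ≤ x := by omega
        -- x < stop → k*x ≤ 10^(i+1) → 2x < 10^(i+1) ≤ 2*s0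
        have hxk : x * k ≤ (10 : Int) ^ (i + 1) := by
          have hx' : x ≤ stop - 1 := by omega
          have := mul_le_mul_of_nonneg_right hx' (by omega : (0:Int) ≤ k)
          omega
        have h2x : 2 * x < (10 : Int) ^ (i + 1) := by nlinarith
        apply pvS0_min k hex x hx9 hxdvd (by omega)
      rw [hfind]
      apply ih (i + 1) (by omega) (by omega)
      have : i + 1 + fuel = i + (fuel + 1) := by omega
      rw [this]
      exact hhigh

-- combine, given an explicit success witness j < 15873
theorem pv_combine (k : Int) (hk : 3 ≤ k) (j : Nat) (hjlt : j < 15873)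
    (hj : pA_pred k (9 + 9 * (j : Int)) = true) :
    pA_outer k 10 1 = pB_loop k 20000 9 := by
  have hex : ∃ j : Nat, pA_pred k (9 + 9 * (j : Int)) = true := ⟨j, hj⟩
  have hub : pvS0 k hex ≤ 9 + 9 * (j : Int) := pvS0_le k hex j hj
  have hs09 := pvS0_ge k hex
  have hsmall : pvS0 k hex ≤ 142857 := by
    have : (j : Int) ≤ 15872 := by exact_mod_cast Nat.lt_succ_iff.mp hjlt
    omega
  rw [pA_finds k hk hex 10 1 (by omega) (by omega) (by norm_num; omega)]
  rw [pB_finds k hex 20000 9 (by omega) (by norm_num) (by omega) (by push_cast; omega)]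

-- ===== VERDICT (by name: the statement is the Claim_ definition above) =====
theorem problem_52_spec : Claim_equal_problem_52 := by
  intro k _ hpre
  unfold Spec_problem_52 problem_52 problem_52_alt
  by_cases h2 : k ≤ 2
  · simp [h2]
  · unfold Pre_problem_52 at hpre
    rw [if_neg h2, if_neg h2]
    have hk : k = 3 ∨ k = 4 ∨ k = 5 ∨ k = 6 := by omega
    rcases hk with rfl | rfl | rfl | rfl
    · exact pv_combine 3 (by norm_num) 197 (by norm_num) (by decide)
    · exact pv_combine 4 (by norm_num) 15872 (by norm_num) (by decide)
    · exact pv_combine 5 (by norm_num) 15872 (by norm_num) (by decide)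
    · exact pv_combine 6 (by norm_num) 15872 (by norm_num) (by decide)
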